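-- pv_equiv track=rewrite | github.com/TPAFS/hicric | src/modeling/background_extraction.py | combine_adjacent_tuples
-- ===== SOURCE A (Python) =====
-- def combine_adjacent_tuples(tuples, k):
--     if not tuples:
--         return []
--
--     result = [tuples[0]]
--
--     for i in range(1, len(tuples)):
--         prev_tuple = result[-1]
--         curr_tuple = tuples[i]
--
--         if curr_tuple[0] - prev_tuple[1] <= k:
--             result[-1] = (prev_tuple[0], curr_tuple[1])
--         else:
--             result.append(curr_tuple)
--
--     return result
-- ===== SOURCE B (Python) =====
-- def combine_adjacent_tuples(tuples, k):
--     # Build the result back-to-front: walk the tuples in reverse and either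
--     # extend the run at the front of the output or start a new one.
--     out = []
--     for t in reversed(tuples):
--         if out and out[0][0] - t[1] <= k:
--             out[0] = (t[0], out[0][1])
--         else:
--             out.insert(0, t)
--     return out
-- ===== Notes on version B (the rewrite author's own statement) =====
-- stated objective: alternative
-- what changed: B builds the result back-to-front with a single reverse pass that either extends the front run or prepends a new one, instead of A's forward loop mutating the last element of a growing list.
import Mathlib
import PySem

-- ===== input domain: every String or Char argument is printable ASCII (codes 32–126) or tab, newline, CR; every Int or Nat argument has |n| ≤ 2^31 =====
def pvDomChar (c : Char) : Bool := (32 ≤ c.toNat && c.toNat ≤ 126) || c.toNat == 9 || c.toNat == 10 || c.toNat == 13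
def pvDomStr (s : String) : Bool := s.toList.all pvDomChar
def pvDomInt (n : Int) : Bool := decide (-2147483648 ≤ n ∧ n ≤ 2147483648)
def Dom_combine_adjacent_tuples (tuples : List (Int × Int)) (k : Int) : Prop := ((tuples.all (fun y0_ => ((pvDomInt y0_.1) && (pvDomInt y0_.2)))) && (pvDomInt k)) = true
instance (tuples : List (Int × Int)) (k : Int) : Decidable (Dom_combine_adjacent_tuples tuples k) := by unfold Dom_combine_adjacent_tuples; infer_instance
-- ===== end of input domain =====

-- B builds the merged list back-to-front in one reverse pass (prepend or extend the front run)
-- instead of A's forward loop that mutates the last element of a growing result list.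


-- ===== PORT A =====
def combine_adjacent_tuples (tuples : List (Int × Int)) (k : Int) : List (Int × Int) :=
  match tuples with
  | [] => []
  | t0 :: _ =>
    (PySem.List.pyRange 1 (PySem.List.len tuples) 1).foldl
      (fun result i =>
        let prev_tuple := PySem.List.pyGetD result (-1) (0, 0)
        let curr_tuple := PySem.List.pyGetD tuples i (0, 0)
        if curr_tuple.1 - prev_tuple.2 ≤ k then
          PySem.List.pySetD result (-1) (prev_tuple.1, curr_tuple.2)
        else
          result ++ [curr_tuple])
      [t0]

-- ===== PORT B =====
def combine_adjacent_tuples_alt (tuples : List (Int × Int)) (k : Int) : List (Int × Int) :=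
  tuples.reverse.foldl
    (fun out t =>
      match out with
      | [] => [t]
      | h :: rest => if h.1 - t.2 ≤ k then (t.1, h.2) :: rest else t :: h :: rest)
    []

-- ===== PRECONDITION & SPEC =====
def Spec_combine_adjacent_tuples (tuples : List (Int × Int)) (k : Int) (out : List (Int × Int)) : Prop := out = combine_adjacent_tuples_alt tuples k
instance (tuples : List (Int × Int)) (k : Int) (out : List (Int × Int)) : Decidable (Spec_combine_adjacent_tuples tuples k out) := by unfold Spec_combine_adjacent_tuples; infer_instance

-- ===== CLAIM (what is proved, stated in full; the proofs are below) =====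
def Claim_equal_combine_adjacent_tuples : Prop := ∀ (tuples : List (Int × Int)) (k : Int), Dom_combine_adjacent_tuples tuples k → Spec_combine_adjacent_tuples tuples k (combine_adjacent_tuples tuples k)

-- ===== LEMMAS AND PROOFS =====

-- B's loop step (fold over the reversed list = foldr over the list).
def pvStepB (k : Int) (t : Int × Int) (out : List (Int × Int)) : List (Int × Int) :=
  match out with
  | [] => [t]
  | h :: rest => if h.1 - t.2 ≤ k then (t.1, h.2) :: rest else t :: h :: rest

lemma altB_eq_foldr (tuples : List (Int × Int)) (k : Int) :
    combine_adjacent_tuples_alt tuples k = tuples.foldr (pvStepB k) [] := by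
  rw [combine_adjacent_tuples_alt, List.foldl_reverse]
  rfl

-- The head of B's foldr on (a, b) :: rs is (a, e) for some e and tail not depending on a.
lemma foldr_head (k b : Int) (rs : List (Int × Int)) :
    ∃ e t, ∀ a : Int, List.foldr (pvStepB k) [] ((a, b) :: rs) = (a, e) :: t := by
  induction rs generalizing b with
  | nil => exact ⟨b, [], fun a => rfl⟩
  | cons c rs ih =>
    obtain ⟨e, t, he⟩ := ih c.2
    have hfc : pvStepB k c (List.foldr (pvStepB k) [] rs) = (c.1, e) :: t := by
      have := he c.1; simpa using this
    by_cases hc : c.1 - b ≤ k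
    · refine ⟨e, t, fun a => ?_⟩
      simp only [List.foldr_cons, hfc]
      simp [pvStepB, hc]
    · refine ⟨b, (c.1, e) :: t, fun a => ?_⟩
      simp only [List.foldr_cons, hfc]
      simp [pvStepB, hc]

-- result[-1] = v on a list known to be pre ++ [a].
lemma pvSetD_neg_one_append {α : Type} (xs : List α) (a v : α) :
    PySem.List.pySetD (xs ++ [a]) (-1) v = xs ++ [v] := by
  simp [PySem.List.pySetD, PySem.List.pySet?, PySem.List.pyIdx?]

-- A's loop over the remaining tuples, with the invariant that the accumulator is pre ++ [acc].
lemma loopA_eq (k : Int) (rest : List (Int × Int)) :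
    ∀ (acc : Int × Int) (pre : List (Int × Int)),
      rest.foldl
        (fun result curr_tuple =>
          let prev_tuple := PySem.List.pyGetD result (-1) ((0 : Int), (0 : Int))
          if curr_tuple.1 - prev_tuple.2 ≤ k then
            PySem.List.pySetD result (-1) (prev_tuple.1, curr_tuple.2)
          else
            result ++ [curr_tuple])
        (pre ++ [acc])
      = pre ++ List.foldr (pvStepB k) [] (acc :: rest) := by
  induction rest with
  | nil => intro acc pre; simp [pvStepB]
  | cons c rs ih =>
    intro acc pre
    obtain ⟨e, t, he⟩ := foldr_head k c.2 rs
    have hset : PySem.List.pySetD (pre ++ [acc]) (-1) (acc.1, c.2) = pre ++ [(acc.1, c.2)] :=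
      pvSetD_neg_one_append pre acc (acc.1, c.2)
    have hfc : pvStepB k c (List.foldr (pvStepB k) [] rs) = (c.1, e) :: t := by
      have := he c.1; simpa using this
    by_cases hc : c.1 - acc.2 ≤ k
    · simp only [List.foldl_cons, PySem.List.pyGetD_neg_one_append_singleton, hc, if_pos]
      rw [hset, ih (acc.1, c.2) pre]
      congr 1
      calc pvStepB k (acc.1, c.2) (List.foldr (pvStepB k) [] rs)
          = List.foldr (pvStepB k) [] ((acc.1, c.2) :: rs) := rfl
        _ = (acc.1, e) :: t := he acc.1
        _ = List.foldr (pvStepB k) [] (acc :: c :: rs) := by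
              rw [List.foldr_cons, List.foldr_cons, hfc]
              simp [pvStepB, hc]
    · simp only [List.foldl_cons, PySem.List.pyGetD_neg_one_append_singleton, hc, if_neg,
        not_false_iff]
      have hih := ih c (pre ++ [acc])
      have hBc : List.foldr (pvStepB k) [] (c :: rs) = (c.1, e) :: t := hfc
      have hB : List.foldr (pvStepB k) [] (acc :: c :: rs) = acc :: (c.1, e) :: t := by
        rw [List.foldr_cons, hBc]
        simp only [pvStepB]
        rw [if_neg hc]
      rw [show pre ++ [acc] ++ [c] = (pre ++ [acc]) ++ [c] by simp, hih, hBc, hB]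
      simp

-- ===== VERDICT (by name: the statement is the Claim_ definition above) =====
theorem combine_adjacent_tuples_spec : Claim_equal_combine_adjacent_tuples := by
  intro tuples k _
  unfold Spec_combine_adjacent_tuples
  rw [altB_eq_foldr]
  match tuples with
  | [] => rfl
  | t0 :: rest =>
    have h := PySem.List.foldl_pyRange_pyGetD (xs := t0 :: rest)
      (f := fun result (curr_tuple : Int × Int) =>
        let prev_tuple := PySem.List.pyGetD result (-1) ((0 : Int), (0 : Int))
        if curr_tuple.1 - prev_tuple.2 ≤ k then
          PySem.List.pySetD result (-1) (prev_tuple.1, curr_tuple.2)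
        else result ++ [curr_tuple])
      (d := ((0 : Int), (0 : Int))) (init := [t0]) (a := 1) (by omega)
    calc combine_adjacent_tuples (t0 :: rest) k
        = rest.foldl
            (fun result curr_tuple =>
              let prev_tuple := PySem.List.pyGetD result (-1) ((0 : Int), (0 : Int))
              if curr_tuple.1 - prev_tuple.2 ≤ k then
                PySem.List.pySetD result (-1) (prev_tuple.1, curr_tuple.2)
              else result ++ [curr_tuple]) [t0] := h
      _ = List.foldr (pvStepB k) [] (t0 :: rest) := by
            simpa using loopA_eq k rest t0 []
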